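-- pv_equiv track=rewrite | github.com/alexandrebatista84/fundamentos-programacao | Aula Prática 8/Exercicio9.py | perfeitos_entre
-- ===== SOURCE A (Python) =====
-- def perfeito(limite,soma=0,aux=0,res=True):
--     if soma==limite:
--         return True
--     elif soma>limite:
--         return False
--     else:
--         return perfeito(limite,soma+aux,aux+1,res and True)
--
-- def perfeitos_entre(n1,n2):
--
--     if n1>n2:
--         return []
--     else:
--         if perfeito(n1):
--             return [n1]+perfeitos_entre(n1+1,n2)
--         else:
--             return perfeitos_entre(n1+1,n2)
-- ===== SOURCE B (Python) =====
-- def perfeitos_entre(n1, n2):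
--     # advance to the first triangular number >= n1
--     k, t = 0, 0
--     while t < n1:
--         k += 1
--         t += k
--     # collect triangular numbers while they stay <= n2
--     out = []
--     while t <= n2:
--         out.append(t)
--         k += 1
--         t += k
--     return out
-- ===== Notes on version B (the rewrite author's own statement) =====
-- stated objective: alternative
-- what changed: Instead of testing every integer in [n1,n2] by recursively re-summing 0+1+2+... (and recursing once per integer), B generates the triangular numbers k(k+1)/2 directly with a running sum, skipping to the first one >= n1 and collecting while <= n2; it needs no deep recursion (a timing run could not confirm a speed-up, so none is claimed).
-- outside the precondition, e.g. on perfeitos_entre(10000000, 10000002): A returns [], B returns []; on perfeitos_entre(4000000, 4003050): A returns [4000206, 4003035], B returns [4000206, 4003035]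
import Mathlib
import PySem

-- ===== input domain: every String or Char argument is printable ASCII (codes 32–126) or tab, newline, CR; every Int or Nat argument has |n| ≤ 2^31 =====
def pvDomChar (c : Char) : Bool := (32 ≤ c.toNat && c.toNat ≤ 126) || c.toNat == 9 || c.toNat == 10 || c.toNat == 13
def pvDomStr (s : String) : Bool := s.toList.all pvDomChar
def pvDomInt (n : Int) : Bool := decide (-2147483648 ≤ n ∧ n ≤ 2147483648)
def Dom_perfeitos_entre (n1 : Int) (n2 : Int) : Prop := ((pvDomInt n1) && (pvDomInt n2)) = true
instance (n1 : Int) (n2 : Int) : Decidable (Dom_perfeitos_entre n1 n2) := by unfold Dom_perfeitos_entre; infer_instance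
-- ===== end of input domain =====

-- B replaces A's per-integer recursive triangular-sum test over [n1,n2] by directly
-- generating the triangular numbers with a running sum (a different algorithm, no deep recursion).

-- ===== PORT A =====
-- perfeito(limite, soma=0, aux=0, res=True): the fuel argument only makes the recursion
-- total in Lean; perfeito supplies enough fuel for every input (see perfeito_spec below).
def perfeitoAux : Nat → Int → Int → Int → Bool → Bool
  | 0, _, _, _, _ => false
  | fuel+1, limite, soma, aux, res =>
    if soma = limite then true
    else if soma > limite then false
    else perfeitoAux fuel limite (soma + aux) (aux + 1) (res && true)

def perfeito (limite : Int) : Bool := perfeitoAux (limite.toNat + 3) limite 0 0 true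

def perfeitos_entre (n1 : Int) (n2 : Int) : List Int :=
  if n1 > n2 then []
  else if perfeito n1 then n1 :: perfeitos_entre (n1 + 1) n2
  else perfeitos_entre (n1 + 1) n2
termination_by (n2 + 1 - n1).toNat
decreasing_by all_goals omega

-- ===== PORT B =====
-- first while loop of Source B: advance (k, t) to the first triangular number t >= n1;
-- the fuel argument only makes the loop total (t grows by ≥ 1 per step, so the fuel
-- perfeitos_entre_alt supplies is enough)
def triFindStartAux : Nat → Int → Nat → Int → Nat × Int
  | 0, _, k, t => (k, t)
  | fuel+1, n1, k, t => if t < n1 then triFindStartAux fuel n1 (k + 1) (t + (k + 1)) else (k, t)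

-- second while loop of Source B: collect triangular numbers while t <= n2 (fuel likewise)
def triCollectAux : Nat → Int → Nat → Int → List Int
  | 0, _, _, _ => []
  | fuel+1, n2, k, t => if t ≤ n2 then t :: triCollectAux fuel n2 (k + 1) (t + (k + 1)) else []

def perfeitos_entre_alt (n1 : Int) (n2 : Int) : List Int :=
  let p := triFindStartAux n1.toNat n1 0 0
  triCollectAux (n2 + 1 - p.2).toNat n2 p.1 p.2

-- ===== PRECONDITION & SPEC =====
-- Pre_ excludes only inputs on which the Python A overflows the interpreter stack and
-- raises RecursionError: A nests one frame per integer of [n1,n2] plus ≈ sqrt(2*n2) frames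
-- for the innermost perfeito call, so with the runner's depth budget of 10000 the bound
-- below (depth ≤ 3000 + sqrt(2*10^7) ≈ 7500) is guaranteed safe; it is a closed-form
-- under-approximation, and on excluded inputs where A still happens to return, B returns
-- the same list (the equivalence lemma ports_agree below holds for ALL inputs; Pre_ only
-- keeps the differential test away from A's RecursionError region).
def Pre_perfeitos_entre (n1 : Int) (n2 : Int) : Prop :=
  n1 > n2 ∨ (n2 - n1 ≤ 3000 ∧ n2 ≤ 10000000)
instance (n1 : Int) (n2 : Int) : Decidable (Pre_perfeitos_entre n1 n2) := by unfold Pre_perfeitos_entre; infer_instance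

def pvWitness_perfeitos_entre : Int × Int := (0, 60)

def Spec_perfeitos_entre (n1 : Int) (n2 : Int) (out : List Int) : Prop := out = perfeitos_entre_alt n1 n2
instance (n1 : Int) (n2 : Int) (out : List Int) : Decidable (Spec_perfeitos_entre n1 n2 out) := by unfold Spec_perfeitos_entre; infer_instance

-- ===== CLAIM (what is proved, stated in full; the proofs are below) =====
def Claim_equal_perfeitos_entre : Prop := ∀ (n1 : Int) (n2 : Int), Dom_perfeitos_entre n1 n2 → Pre_perfeitos_entre n1 n2 → Spec_perfeitos_entre n1 n2 (perfeitos_entre n1 n2)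


-- ===== LEMMAS AND PROOFS =====

-- the triangular numbers 0, 1, 3, 6, …
def T : Nat → Int
  | 0 => 0
  | k + 1 => T k + (k + 1)

theorem T_succ (k : Nat) : T (k + 1) = T k + ((k : Int) + 1) := by
  simp only [T]

theorem T_mono : ∀ {j k : Nat}, j ≤ k → T j ≤ T k := by
  intro j k h
  induction k with
  | zero =>
    have hj : j = 0 := Nat.le_zero.mp h
    subst hj; exact le_refl _
  | succ k ih =>
    rcases Nat.lt_or_ge j (k + 1) with h' | h'
    · have h1 := ih (Nat.lt_succ_iff.mp h')
      have h2 := T_succ k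
      omega
    · have : j = k + 1 := by omega
      subst this; exact le_refl _

theorem T_strict : ∀ {j k : Nat}, j < k → T j < T k := by
  intro j k h
  have h1 : T j ≤ T (k - 1) := T_mono (by omega)
  have h2 : k - 1 + 1 = k := by omega
  have h3 := T_succ (k - 1)
  rw [h2] at h3
  omega

theorem T_ge_self : ∀ k : Nat, (k : Int) ≤ T k := by
  intro k
  induction k with
  | zero => simp [T]
  | succ k ih => have := T_succ k; push_cast; omega

theorem perfeitoAux_spec : ∀ (fuel : Nat) (limite : Int) (j : Nat) (res : Bool),
    limite < T (j + fuel) →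
    (perfeitoAux fuel limite (T j) ((j : Int) + 1) res = true ↔ ∃ k, j ≤ k ∧ T k = limite) := by
  intro fuel
  induction fuel with
  | zero =>
    intro limite j res hlt
    rw [Nat.add_zero] at hlt
    simp only [perfeitoAux]
    constructor
    · intro h; cases h
    · rintro ⟨k, hk, hTk⟩
      have := T_mono hk
      omega
  | succ fuel ih =>
    intro limite j res hlt
    rw [perfeitoAux]
    by_cases h1 : T j = limite
    · rw [if_pos h1]
      exact ⟨fun _ => ⟨j, le_refl _, h1⟩, fun _ => rfl⟩
    · rw [if_neg h1]
      by_cases h2 : T j > limite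
      · rw [if_pos h2]
        constructor
        · intro h; cases h
        · rintro ⟨k, hk, hTk⟩
          have := T_mono hk
          omega
      · rw [if_neg h2]
        have hstep : T j + ((j : Int) + 1) = T (j + 1) := (T_succ j).symm
        have harg : ((j : Int) + 1 + 1) = ((j + 1 : Nat) : Int) + 1 := by push_cast; ring
        rw [hstep, harg]
        have hlt' : limite < T ((j + 1) + fuel) := by
          have heq : (j + 1) + fuel = j + (fuel + 1) := by omega
          rw [heq]; exact hlt
        rw [ih limite (j + 1) (res && true) hlt']
        constructor
        · rintro ⟨k, hk, hTk⟩; exact ⟨k, by omega, hTk⟩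
        · rintro ⟨k, hk, hTk⟩
          rcases Nat.eq_or_lt_of_le hk with h | h
          · subst h; omega
          · exact ⟨k, by omega, hTk⟩

theorem perfeito_spec (limite : Int) : perfeito limite = true ↔ ∃ k, T k = limite := by
  unfold perfeito
  rw [perfeitoAux]
  by_cases h0 : (0 : Int) = limite
  · rw [if_pos h0]
    exact ⟨fun _ => ⟨0, h0⟩, fun _ => rfl⟩
  · rw [if_neg h0]
    by_cases hneg : (0 : Int) > limite
    · rw [if_pos hneg]
      constructor
      · intro h; cases h
      · rintro ⟨k, hTk⟩
        have h1 : T 0 ≤ T k := T_mono (Nat.zero_le k)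
        simp only [T] at h1
        omega
    · rw [if_neg hneg]
      have h00 : (0 : Int) + 0 = T 0 := by simp [T]
      have h01 : (0 : Int) + 1 = ((0 : Nat) : Int) + 1 := by norm_num
      rw [h00, h01]
      have hfuel : limite < T (0 + (limite.toNat + 2)) := by
        have h2 := T_ge_self (0 + (limite.toNat + 2))
        have h3 : limite ≤ (limite.toNat : Int) := Int.self_le_toNat limite
        push_cast at h2
        omega
      rw [perfeitoAux_spec (limite.toNat + 2) limite 0 (true && true) hfuel]
      constructor
      · rintro ⟨k, _, hTk⟩; exact ⟨k, hTk⟩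
      · rintro ⟨k, hTk⟩; exact ⟨k, Nat.zero_le k, hTk⟩

theorem triFindStartAux_spec : ∀ (fuel : Nat) (n1 : Int) (j : Nat),
    (n1 - T j).toNat ≤ fuel →
    (∀ i, i < j → T i < n1) →
    ∃ k, triFindStartAux fuel n1 j (T j) = (k, T k) ∧ n1 ≤ T k ∧ (∀ i, i < k → T i < n1) := by
  intro fuel
  induction fuel with
  | zero =>
    intro n1 j hfuel hinv
    exact ⟨j, rfl, by omega, hinv⟩
  | succ fuel ih =>
    intro n1 j hfuel hinv
    rw [triFindStartAux]
    by_cases h : T j < n1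
    · rw [if_pos h]
      have hstep : T j + ((j : Int) + 1) = T (j + 1) := (T_succ j).symm
      rw [hstep]
      have hJ : T j < T (j + 1) := T_strict (Nat.lt_succ_self j)
      have hfuel' : (n1 - T (j + 1)).toNat ≤ fuel := by omega
      have hinv' : ∀ i, i < j + 1 → T i < n1 := by
        intro i hi
        rcases Nat.lt_or_ge i j with h' | h'
        · exact hinv i h'
        · have : i = j := by omega
          subst this; exact h
      exact ih n1 (j + 1) hfuel' hinv'
    · rw [if_neg h]
      exact ⟨j, rfl, by omega, hinv⟩

theorem main_eq : ∀ (m : Nat) (n1 n2 : Int) (k : Nat) (fuel : Nat),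
    (n2 + 1 - n1).toNat = m →
    (n2 + 1 - T k).toNat ≤ fuel →
    n1 ≤ T k →
    (∀ i, i < k → T i < n1) →
    perfeitos_entre n1 n2 = triCollectAux fuel n2 k (T k) := by
  intro m
  induction m using Nat.strong_induction_on with
  | _ m ih =>
    intro n1 n2 k fuel hm hfuel hk hinv
    rw [perfeitos_entre]
    by_cases hrange : n1 > n2
    · rw [if_pos hrange]
      cases fuel with
      | zero => rfl
      | succ fuel => rw [triCollectAux, if_neg (by omega)]
    · rw [if_neg hrange]
      by_cases hT : T k = n1
      · have hperf : perfeito n1 = true := (perfeito_spec n1).mpr ⟨k, hT⟩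
        rw [if_pos hperf]
        cases fuel with
        | zero => omega
        | succ fuel =>
          rw [triCollectAux, if_pos (by omega)]
          have hstep : T k + ((k : Int) + 1) = T (k + 1) := (T_succ k).symm
          rw [hstep]
          have hJ : T k < T (k + 1) := T_strict (Nat.lt_succ_self k)
          have hk' : n1 + 1 ≤ T (k + 1) := by omega
          have hinv' : ∀ i, i < k + 1 → T i < n1 + 1 := by
            intro i hi
            rcases Nat.lt_or_ge i k with h' | h'
            · have := hinv i h'; omega
            · have : i = k := by omega
              subst this; omega
          have := ih (n2 + 1 - (n1 + 1)).toNat (by omega) (n1 + 1) n2 (k + 1) fuel rfl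
            (by omega) hk' hinv'
          rw [this, hT]
      · have hperf : ¬ (perfeito n1 = true) := by
          intro h
          obtain ⟨j, hj⟩ := (perfeito_spec n1).mp h
          rcases Nat.lt_or_ge j k with h' | h'
          · have := hinv j h'; omega
          · rcases Nat.eq_or_lt_of_le h' with h'' | h''
            · subst h''; omega
            · have := T_strict h''; omega
        rw [if_neg hperf]
        exact ih (n2 + 1 - (n1 + 1)).toNat (by omega) (n1 + 1) n2 k fuel rfl hfuel
          (by omega) (fun i hi => by have := hinv i hi; omega)

theorem ports_agree (n1 n2 : Int) : perfeitos_entre n1 n2 = perfeitos_entre_alt n1 n2 := by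
  have h0 : T 0 = (0 : Int) := rfl
  have hfuel : (n1 - T 0).toNat ≤ n1.toNat := by rw [h0]; omega
  obtain ⟨k, heq, hge, hinv⟩ :=
    triFindStartAux_spec n1.toNat n1 0 hfuel (by intro i hi; omega)
  rw [h0] at heq
  unfold perfeitos_entre_alt
  simp only [heq]
  exact main_eq (n2 + 1 - n1).toNat n1 n2 k (n2 + 1 - T k).toNat rfl (le_refl _) hge hinv

-- ===== VERDICT (by name: the statement is the Claim_ definition above) =====
theorem perfeitos_entre_spec : Claim_equal_perfeitos_entre := by
  intro n1 n2 _ _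
  unfold Spec_perfeitos_entre
  exact ports_agree n1 n2
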